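-- pv_equiv track=rewrite | github.com/terrier-org/pyterrier | pyterrier/terrier/tokeniser.py | check
-- ===== SOURCE A (Python) =====
-- class BaseTokeniser():
--     LOWERCASE = True
--     maxNumOfSameConseqLettersPerTerm = 3
--     maxNumOfDigitsPerTerm = 4
--     MAX_TERM_LENGTH = 20
--
-- def check(s : str) -> str:
--     # if the s is None or if it is longer than a specified length
--     s = s.strip()
--     counter = 0
--     counterdigit = 0
--     ch = -1
--     for c in s:
--         chNew = ord(c)
--         if 48 <= chNew <= 57:  # 0 to 9
--             counterdigit += 1
--         if ch == chNew:
--             counter += 1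
--         else:
--             counter = 1
--         ch = chNew
--         # if it contains more than 3 consecutive same letters,
--         # or more than 4 digits, then discard the term.
--         if counter > BaseTokeniser.maxNumOfSameConseqLettersPerTerm or counterdigit > BaseTokeniser.maxNumOfDigitsPerTerm:
--             return ""
--     return s.lower() if BaseTokeniser.LOWERCASE else s
-- ===== SOURCE B (Python) =====
-- class BaseTokeniser():
--     LOWERCASE = True
--     maxNumOfSameConseqLettersPerTerm = 3
--     maxNumOfDigitsPerTerm = 4
--     MAX_TERM_LENGTH = 20
--
-- def check(s: str) -> str:
--     s = s.strip()
--     digits = sum(1 for c in s if '0' <= c <= '9')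
--     runs = []
--     i = 0
--     while i < len(s):
--         j = i
--         while j < len(s) and s[j] == s[i]:
--             j += 1
--         runs.append(j - i)
--         i = j
--     if digits > BaseTokeniser.maxNumOfDigitsPerTerm or max(runs, default=0) > BaseTokeniser.maxNumOfSameConseqLettersPerTerm:
--         return ""
--     return s.lower() if BaseTokeniser.LOWERCASE else s
-- ===== Notes on version B (the rewrite author's own statement) =====
-- stated objective: simpler
-- what changed: Replaced A's single fused early-exit state-machine loop (running same-char counter, running digit counter, previous-char code) by two independent whole-string aggregates: a digit count and the list of run lengths, compared against the limits once at the end.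
import Mathlib
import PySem

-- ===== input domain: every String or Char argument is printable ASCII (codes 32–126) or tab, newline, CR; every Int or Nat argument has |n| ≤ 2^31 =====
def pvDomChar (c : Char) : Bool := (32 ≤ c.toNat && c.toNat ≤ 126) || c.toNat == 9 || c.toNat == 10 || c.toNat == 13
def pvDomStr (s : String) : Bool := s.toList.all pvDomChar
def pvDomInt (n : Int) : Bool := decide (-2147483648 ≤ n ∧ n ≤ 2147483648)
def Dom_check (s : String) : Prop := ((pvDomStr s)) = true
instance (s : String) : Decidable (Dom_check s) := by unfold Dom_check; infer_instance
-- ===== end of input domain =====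

-- B replaces A's fused early-exit state-machine loop by two independent whole-string aggregates (digit count and run lengths); same return value on all inputs.

-- ===== PORT A =====
-- A's for-loop with its early return: returns true iff the term is discarded
def checkLoop : List Char → Nat → Nat → Int → Bool
  | [], _, _, _ => false
  | c :: rest, counter, counterdigit, ch =>
    let chNew : Int := (c.toNat : Int)
    let counterdigit' := if 48 ≤ chNew ∧ chNew ≤ 57 then counterdigit + 1 else counterdigit
    let counter' := if ch == chNew then counter + 1 else 1
    if counter' > 3 ∨ counterdigit' > 4 then true
    else checkLoop rest counter' counterdigit' chNew

def check (s : String) : String :=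
  if checkLoop (PySem.Str.strip s).toList 0 0 (-1) then ""
  else PySem.Str.lower (PySem.Str.strip s)

-- ===== PORT B =====
-- run lengths of the maximal blocks of equal characters (Source B's index scan over runs)
def runLens : List Char → List Nat
  | [] => []
  | c :: rest =>
    let k := (rest.takeWhile (fun d => d == c)).length
    (k + 1) :: runLens (rest.drop k)
termination_by l => l.length
decreasing_by
  simp only [List.length_drop, List.length_cons]
  omega

def check_alt (s : String) : String :=
  if (PySem.Str.strip s).toList.countP (fun c => decide ('0' ≤ c ∧ c ≤ '9')) > 4
      ∨ (runLens (PySem.Str.strip s).toList).foldl max 0 > 3 then ""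
  else PySem.Str.lower (PySem.Str.strip s)

-- ===== PRECONDITION & SPEC =====
def Spec_check (s : String) (out : String) : Prop := out = check_alt s
instance (s : String) (out : String) : Decidable (Spec_check s out) := by unfold Spec_check; infer_instance

-- ===== CLAIM (what is proved, stated in full; the proofs are below) =====
def Claim_equal_check : Prop := ∀ (s : String), Dom_check s → Spec_check s (check s)

-- ===== LEMMAS AND PROOFS =====

-- maximal value A's consecutive-same-char counter reaches over the remaining list,
-- with the previous character as an Option (none plays the role of A's -1 sentinel)
def maxCounter (prev : Option Char) (c : Nat) : List Char → Nat
  | [] => 0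
  | x :: rest =>
    let c' := if prev = some x then c + 1 else 1
    max c' (maxCounter (some x) c' rest)

theorem encode_beq (prev : Option Char) (y : Char) :
    ((match prev with | none => (-1 : Int) | some x => (x.toNat : Int)) == (y.toNat : Int))
      = decide (prev = some y) := by
  cases prev with
  | none =>
    have h : ((-1 : Int) == (y.toNat : Int)) = false := by
      rw [beq_eq_false_iff_ne]
      intro hh; omega
    rw [h]; simp
  | some x =>
    by_cases h : x = y
    · subst h; simp
    · have hne : (x.toNat : Int) ≠ (y.toNat : Int) := by
        intro hh
        apply h
        have h2 : x.toNat = y.toNat := by exact_mod_cast hh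
        exact Char.ext (UInt32.toNat_inj.mp h2)
      rw [show ((x.toNat : Int) == (y.toNat : Int)) = false from beq_eq_false_iff_ne.mpr hne]
      simp [h]

theorem digit_char_iff (c : Char) :
    (48 ≤ (c.toNat : Int) ∧ (c.toNat : Int) ≤ 57) ↔ ('0' ≤ c ∧ c ≤ '9') := by
  have h0 : ('0' : Char).val.toNat = 48 := by decide
  have h9 : ('9' : Char).val.toNat = 57 := by decide
  simp only [Char.le_def, UInt32.le_iff_toNat_le, h0, h9, Char.toNat]
  omega

theorem loop_eq (l : List Char) : ∀ (c d : Nat) (prev : Option Char), c ≤ 3 → d ≤ 4 →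
    checkLoop l c d (match prev with | none => (-1 : Int) | some x => (x.toNat : Int))
      = decide (d + l.countP (fun c => decide ('0' ≤ c ∧ c ≤ '9')) > 4 ∨ maxCounter prev c l > 3) := by
  induction l with
  | nil =>
    intro c d prev hc hd
    simp only [checkLoop, maxCounter, List.countP_nil]
    rw [eq_comm, decide_eq_false_iff_not]
    omega
  | cons x rest ih =>
    intro c d prev hc hd
    simp only [checkLoop, encode_beq prev x, decide_eq_true_eq]
    have hdig : (if decide ('0' ≤ x ∧ x ≤ '9') = true then (1 : Nat) else 0)
        = (if 48 ≤ (x.toNat : Int) ∧ (x.toNat : Int) ≤ 57 then (1 : Nat) else 0) := by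
      by_cases hh : 48 ≤ (x.toNat : Int) ∧ (x.toNat : Int) ≤ 57
      · rw [if_pos hh, if_pos (decide_eq_true ((digit_char_iff x).mp hh))]
      · rw [if_neg hh, if_neg (by
          simp only [decide_eq_true_eq]
          exact fun h2 => hh ((digit_char_iff x).mpr h2))]
    set d' := if 48 ≤ (x.toNat : Int) ∧ (x.toNat : Int) ≤ 57 then d + 1 else d with hd'
    set c' := if prev = some x then c + 1 else 1 with hc'
    have hsplit48 : d' = d + (if 48 ≤ (x.toNat : Int) ∧ (x.toNat : Int) ≤ 57 then (1 : Nat) else 0) := by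
      rw [hd']
      split_ifs <;> omega
    have hkey : d + (x :: rest).countP (fun c => decide ('0' ≤ c ∧ c ≤ '9'))
        = d' + rest.countP (fun c => decide ('0' ≤ c ∧ c ≤ '9')) := by
      simp only [List.countP_cons]
      rw [hdig, hsplit48]
      omega
    simp only [maxCounter, ← hc']
    by_cases htrig : c' > 3 ∨ d' > 4
    · rw [if_pos htrig, eq_comm, decide_eq_true_eq]
      rcases htrig with h1 | h2
      · right
        have := Nat.le_max_left c' (maxCounter (some x) c' rest)
        omega
      · left
        have : d' ≤ d + (x :: rest).countP (fun c => decide ('0' ≤ c ∧ c ≤ '9')) := by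
          rw [hkey]; omega
        omega
    · rw [if_neg htrig]
      have hc3 : c' ≤ 3 := by omega
      have hd4 : d' ≤ 4 := by omega
      rw [ih c' d' (some x) hc3 hd4, decide_eq_decide, hkey]
      constructor
      · rintro (h | h)
        · left; exact h
        · right
          have := Nat.le_max_right c' (maxCounter (some x) c' rest)
          omega
      · rintro (h | h)
        · left; exact h
        · right
          by_cases hm : maxCounter (some x) c' rest > 3
          · exact hm
          · exfalso
            have : max c' (maxCounter (some x) c' rest) ≤ 3 := Nat.max_le.mpr ⟨hc3, by omega⟩
            omega

theorem foldl_max_max (l : List Nat) : ∀ (a b : Nat), l.foldl max (max a b) = max a (l.foldl max b) := by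
  induction l with
  | nil => intro a b; simp [List.foldl]
  | cons x t ih =>
    intro a b
    simp only [List.foldl]
    rw [Nat.max_assoc, ih]

-- a block of copies of x followed by a tail not starting with x, entered with run counter c
theorem maxCounter_block (x : Char) : ∀ (tw dw : List Char) (c : Nat),
    (∀ y ∈ tw, y = x) → (∀ y, dw.head? = some y → y ≠ x) →
    max c (maxCounter (some x) c (tw ++ dw)) = max (c + tw.length) (maxCounter none 0 dw) := by
  intro tw
  induction tw with
  | nil =>
    intro dw c _ hdw
    simp only [List.nil_append, List.length_nil, Nat.add_zero]
    cases dw with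
    | nil => simp [maxCounter]
    | cons y t =>
      have hy : y ≠ x := hdw y rfl
      simp only [maxCounter]
      have h1 : ¬ (some x = some y) := by
        intro hxy
        exact hy (Option.some.inj hxy).symm
      have h2 : ¬ ((none : Option Char) = some y) := by simp
      rw [if_neg h1, if_neg h2]
  | cons z tw' ih =>
    intro dw c hz hdw
    have hzx : z = x := hz z (List.mem_cons_self)
    subst hzx
    rw [List.cons_append]
    simp only [maxCounter]
    have hih := ih dw (c + 1) (fun y hy => hz y (List.mem_cons_of_mem _ hy)) hdw
    calc max c (max (c + 1) (maxCounter (some z) (c + 1) (tw' ++ dw)))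
        = max (c + 1) (maxCounter (some z) (c + 1) (tw' ++ dw)) := by
          rw [← Nat.max_assoc]; congr 1; omega
      _ = max ((c + 1) + tw'.length) (maxCounter none 0 dw) := hih
      _ = max (c + (z :: tw').length) (maxCounter none 0 dw) := by
          simp only [List.length_cons]; congr 1; omega

theorem maxCounter_eq_runLens (l : List Char) :
    maxCounter none 0 l = (runLens l).foldl max 0 := by
  induction hn : l.length using Nat.strong_induction_on generalizing l with
  | _ n ih =>
  cases l with
  | nil => simp [maxCounter, runLens]
  | cons x rest =>
    simp only [maxCounter, runLens, if_neg (by simp : ¬ (none : Option Char) = some x)]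
    set p : Char → Bool := (fun d => d == x) with hp
    set tw := rest.takeWhile p with htw
    set dw := rest.drop tw.length with hdwdef
    have hdw : dw = rest.dropWhile p := by
      rw [hdwdef]
      conv_lhs => rw [← List.takeWhile_append_dropWhile (p := p) (l := rest)]
      rw [← htw, List.drop_left]
    have hsplit : rest = tw ++ dw := by
      rw [hdw, htw, List.takeWhile_append_dropWhile]
    have htwx : ∀ y ∈ tw, y = x := by
      intro y hy
      have := List.mem_takeWhile_imp (htw ▸ hy)
      simpa [hp] using this
    have hhead : ∀ y, dw.head? = some y → y ≠ x := by
      intro y hy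
      have := List.head?_dropWhile_not p rest
      rw [← hdw, hy] at this
      simpa [hp] using this
    have hlen : dw.length < n := by
      subst hn
      have : dw.length ≤ rest.length := by rw [hdwdef]; simp
      simp only [List.length_cons]; omega
    have hblock := maxCounter_block x tw dw 1 htwx hhead
    have hIH := ih dw.length hlen dw rfl
    calc max 1 (maxCounter (some x) 1 rest)
        = max 1 (maxCounter (some x) 1 (tw ++ dw)) := by rw [← hsplit]
      _ = max (1 + tw.length) (maxCounter none 0 dw) := hblock
      _ = max (tw.length + 1) ((runLens dw).foldl max 0) := by rw [hIH, Nat.add_comm]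
      _ = ((tw.length + 1) :: runLens dw).foldl max 0 := by
          simp only [List.foldl]
          rw [show max 0 (tw.length + 1) = max (tw.length + 1) 0 from Nat.max_comm _ _,
              foldl_max_max]

-- ===== VERDICT (by name: the statement is the Claim_ definition above) =====
theorem check_spec : Claim_equal_check := by
  intro s _
  unfold Spec_check check check_alt
  have h := loop_eq (PySem.Str.strip s).toList 0 0 none (by omega) (by omega)
  rw [h, maxCounter_eq_runLens]
  simp only [decide_eq_true_eq, Nat.zero_add]
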